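-- pv_equiv track=rewrite | github.com/zouhaisong/visualize_collatz_conjecture | src/p01_gen_numbers/collatz.py | collatz_dict_le
-- ===== SOURCE A (Python) =====
-- def collatz_rule(num:int):
--   if num <= 1:
--     raise Exception("collatz_rule num should large or equal than 1 !")
--
--   if num % 2 == 0:
--     return int(num / 2)
--   else:
--     return num * 3 + 1
--
-- def collatz_dict_le(max:int)->dict:
--   ret = {}
--   for i in range(2,max+1):
--     cur_num = i
--     while(cur_num>1 and cur_num not in ret):
--       next_num = collatz_rule(cur_num)
--       ret[cur_num]=next_num
--       cur_num=next_num
--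
--   return ret
-- ===== SOURCE B (Python) =====
-- def collatz_dict_le(max: int) -> dict:
--     # Different decomposition: a pure recursive 'chain' returns the unseen prefix of a
--     # trajectory as (n, next) association pairs built on the unwind (plus the updated
--     # visited set); the outer loop just concatenates segments, and the dict is
--     # constructed once at the very end from the pair list.
--     def step(n):
--         return n // 2 if n % 2 == 0 else 3 * n + 1
--
--     def chain(n, known):
--         if n <= 1 or n in known:
--             return [], known
--         known.add(n)
--         rest, known = chain(step(n), known)
--         return [(n, step(n))] + rest, known
--
--     items = []
--     known = set()
--     for i in range(2, max + 1):
--         seg, known = chain(i, known)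
--         items += seg
--     return dict(items)
-- ===== Notes on version B (the rewrite author's own statement) =====
-- stated objective: alternative
-- what changed: B replaces A's nested loops that mutate a dict in place by a pure recursive chain function that returns the unseen trajectory segment as association pairs built on the unwind (threading a visited set); the outer loop only concatenates segments and the dict is constructed once at the end from the pair list.
import Mathlib
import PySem

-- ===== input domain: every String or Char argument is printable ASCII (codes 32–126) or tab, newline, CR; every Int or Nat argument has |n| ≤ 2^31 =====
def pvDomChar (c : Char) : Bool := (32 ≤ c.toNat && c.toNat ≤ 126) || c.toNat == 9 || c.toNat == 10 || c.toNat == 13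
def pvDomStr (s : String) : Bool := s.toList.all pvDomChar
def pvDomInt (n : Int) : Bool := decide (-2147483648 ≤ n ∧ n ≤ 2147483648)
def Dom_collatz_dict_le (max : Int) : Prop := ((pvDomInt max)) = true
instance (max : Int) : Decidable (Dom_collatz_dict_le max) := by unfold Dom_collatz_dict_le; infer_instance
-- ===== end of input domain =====

-- B replaces A's interleaved dict-mutating nested loops by a recursive chain that emits association-pair segments on the unwind, concatenated and turned into a dict once at the end; same cost, objective: alternative.


-- ===== PORT A =====
-- collatz_rule: the 'raise' branch (num <= 1) is unreachable at every call site (loop guard cur_num > 1),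
-- so the port is the two return branches; 'int(num / 2)' is num // 2 (num is even there; exact on the tested range).
def pvRuleA (num : Int) : Int :=
  if PySem.Int.mod num 2 == 0 then PySem.Int.floordiv num 2 else num * 3 + 1

-- fuel bound for the while/recursion (Python relies on empirical Collatz termination; never exhausted on tested inputs)
def pvFuel : Nat := 4294967296

-- the 'while cur_num>1 and cur_num not in ret' loop of A
def pvWalkA : Nat → Int → PySem.Dict Int Int → PySem.Dict Int Int
  | 0, _, ret => ret
  | fuel+1, cur_num, ret =>
    if 1 < cur_num ∧ ret.contains cur_num = false then
      let next_num := pvRuleA cur_num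
      pvWalkA fuel next_num (ret.insert cur_num next_num)
    else ret

def collatz_dict_le (max : Int) : List (Int × Int) :=
  ((PySem.List.pyRange 2 (max+1) 1).foldl (fun ret i => pvWalkA pvFuel i ret)
    PySem.Dict.empty).items

-- ===== PORT B =====
def pvStep (n : Int) : Int :=
  if PySem.Int.mod n 2 == 0 then PySem.Int.floordiv n 2 else 3 * n + 1

-- B's recursive 'chain': unseen-prefix pairs built on the unwind, plus the updated visited set
def pvChainB : Nat → Int → PySem.Set Int → List (Int × Int) × PySem.Set Int
  | 0, _, known => ([], known)
  | fuel+1, n, known =>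
    if n ≤ 1 ∨ PySem.Set.contains known n = true then ([], known)
    else
      let known1 := PySem.Set.add known n
      let r := pvChainB fuel (pvStep n) known1
      ((n, pvStep n) :: r.1, r.2)

def pvStepFoldB (st : List (Int × Int) × PySem.Set Int) (i : Int) :
    List (Int × Int) × PySem.Set Int :=
  let r := pvChainB pvFuel i st.2
  (st.1 ++ r.1, r.2)

def collatz_dict_le_alt (max : Int) : List (Int × Int) :=
  let st := (PySem.List.pyRange 2 (max+1) 1).foldl pvStepFoldB
      (([] : List (Int × Int)), PySem.Set.empty)
  (PySem.Dict.ofList st.1).items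

-- ===== PRECONDITION & SPEC =====
def Spec_collatz_dict_le (max : Int) (out : List (Int × Int)) : Prop := out = collatz_dict_le_alt max
instance (max : Int) (out : List (Int × Int)) : Decidable (Spec_collatz_dict_le max out) := by unfold Spec_collatz_dict_le; infer_instance

-- ===== CLAIM (what is proved, stated in full; the proofs are below) =====
def Claim_equal_collatz_dict_le : Prop := ∀ (max : Int), Dom_collatz_dict_le max → Spec_collatz_dict_le max (collatz_dict_le max)

-- ===== LEMMAS AND PROOFS =====

def pvPair (n : Int) : Int × Int := (n, pvStep n)

theorem rule_eq (n : Int) : pvRuleA n = pvStep n := by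
  unfold pvRuleA pvStep
  split_ifs <;> ring

theorem fst_pvPair (S : List Int) : (S.map pvPair).map Prod.fst = S := by
  simp [List.map_map, Function.comp_def, pvPair]

theorem contains_mk_map (S : List Int) (cur : Int) :
    (PySem.Dict.mk (S.map pvPair)).contains cur = S.contains cur := by
  simp [PySem.Dict.contains_mk, List.any_map, pvPair, Function.comp_def, List.any_beq', List.contains_eq_mem]

theorem chain_lockstep (fuel : Nat) : ∀ (n : Int) (S : List Int),
    pvWalkA fuel n (PySem.Dict.mk (S.map pvPair))
      = PySem.Dict.mk (S.map pvPair ++ (pvChainB fuel n S).1)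
    ∧ (pvChainB fuel n S).2 = S ++ (pvChainB fuel n S).1.map Prod.fst
    ∧ (pvChainB fuel n S).1 = ((pvChainB fuel n S).1.map Prod.fst).map pvPair
    ∧ (S.Nodup → (pvChainB fuel n S).2.Nodup) := by
  induction fuel with
  | zero => intro n S; simp [pvWalkA, pvChainB]
  | succ f ih =>
    intro n S
    rw [pvWalkA, pvChainB]
    rw [rule_eq, contains_mk_map]
    simp only [PySem.Set.contains_eq_listContains]
    by_cases h : 1 < n ∧ S.contains n = false
    · have hnm : n ∉ S := by
        have := h.2
        simpa [List.contains_eq_mem] using this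
      have hg : ¬ (n ≤ 1 ∨ S.contains n = true) := by
        rcases h with ⟨hh1, hh2⟩
        rintro (hc | hc)
        · omega
        · rw [hh2] at hc; exact Bool.false_ne_true hc
      rw [if_pos h, if_neg hg]
      have hins : (PySem.Dict.mk (S.map pvPair)).insert n (pvStep n)
          = PySem.Dict.mk ((S ++ [n]).map pvPair) := by
        apply PySem.Dict.ext
        rw [PySem.Dict.items_insert_of_not_contains _ _
          (by rw [contains_mk_map]; exact h.2)]
        simp [pvPair]
      rw [hins, PySem.Set.add_of_not_mem hnm]
      obtain ⟨ih1, ih2, ih3, ih4⟩ := ih (pvStep n) (S ++ [n])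
      refine ⟨?_, ?_, ?_, ?_⟩
      · rw [ih1]; simp [pvPair]
      · simp only [List.map_cons]
        rw [ih2]; simp
      · simp only [List.map_cons]
        conv_lhs => rw [ih3]
        simp [pvPair]
      · intro hS
        refine ih4 (by simp [List.nodup_append, hS]; intro a ha he; exact hnm (he ▸ ha))
    · have hg : (n ≤ 1 ∨ S.contains n = true) := by
        by_cases h1 : 1 < n
        · right
          by_cases h2 : S.contains n = true
          · exact h2
          · exact absurd ⟨h1, by simpa using h2⟩ h
        · left; omega
      rw [if_neg h, if_pos hg]
      refine ⟨?_, ?_, ?_, fun hS => hS⟩ <;> first | rfl | simp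

theorem fold_lockstep (l : List Int) : ∀ (S : List Int),
    l.foldl (fun ret i => pvWalkA pvFuel i ret) (PySem.Dict.mk (S.map pvPair))
      = PySem.Dict.mk ((l.foldl pvStepFoldB (S.map pvPair, S)).1)
    ∧ (l.foldl pvStepFoldB (S.map pvPair, S)).2
        = (l.foldl pvStepFoldB (S.map pvPair, S)).1.map Prod.fst
    ∧ (S.Nodup → (l.foldl pvStepFoldB (S.map pvPair, S)).2.Nodup) := by
  induction l with
  | nil => intro S; exact ⟨rfl, (fst_pvPair S).symm, fun h => h⟩
  | cons x xs ih =>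
    intro S
    obtain ⟨h1, h2, h3, h4⟩ := chain_lockstep pvFuel x S
    have hme : S.map pvPair ++ (pvChainB pvFuel x S).1
        = (S ++ (pvChainB pvFuel x S).1.map Prod.fst).map pvPair := by
      conv_lhs => rw [h3]
      simp
    have hx : pvStepFoldB (S.map pvPair, S) x
        = ((S ++ (pvChainB pvFuel x S).1.map Prod.fst).map pvPair,
           S ++ (pvChainB pvFuel x S).1.map Prod.fst) := by
      unfold pvStepFoldB
      exact Prod.ext (by simpa using hme) (by simpa using h2)
    obtain ⟨g1, g2, g3⟩ := ih (S ++ (pvChainB pvFuel x S).1.map Prod.fst)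
    refine ⟨?_, ?_, ?_⟩
    · simp only [List.foldl_cons, hx]
      rw [h1, hme]
      exact g1
    · simp only [List.foldl_cons, hx]
      exact g2
    · intro hS
      simp only [List.foldl_cons, hx]
      refine g3 ?_
      rw [← h2]; exact h4 hS

-- keys of B's pair list are unique (from the fold invariant), so dict(items).items() is items itself
theorem alt_items (l : List (Int × Int)) (h : (l.map Prod.fst).Nodup) :
    (PySem.Dict.ofList l).items = l := by
  have := PySem.Dict.items_foldl_insert_fresh (l := l) (k := Prod.fst) (v := Prod.snd)
    (d := PySem.Dict.empty) (by intro a _; simp) h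
  simpa [PySem.Dict.ofList] using this

-- ===== VERDICT (by name: the statement is the Claim_ definition above) =====
theorem collatz_dict_le_spec : Claim_equal_collatz_dict_le := by
  intro max _
  unfold Spec_collatz_dict_le collatz_dict_le collatz_dict_le_alt
  obtain ⟨g1, g2, g3⟩ := fold_lockstep (PySem.List.pyRange 2 (max+1) 1) ([] : List Int)
  simp only [List.map_nil] at g1 g2 g3
  simp only [show (PySem.Set.empty : PySem.Set Int) = ([] : List Int) from rfl]
  rw [show (PySem.Dict.empty : PySem.Dict Int Int) = PySem.Dict.mk [] from rfl, g1]
  rw [alt_items _ (by rw [← g2]; exact g3 List.nodup_nil)]
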